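-- pv_equiv track=rewrite | github.com/ayushmangarg2003/LeetCodePython | DSA-LeetCode-main/Leetcode Python/2515.py | closetTarget
-- ===== SOURCE A (Python) =====
-- from typing import List
--
-- def closetTarget(words: List[str], target: str, startIndex: int) -> int:
--     n = len(words)
--
--     next_index = lambda j : (startIndex + j) % n
--     prev_index = lambda j : (startIndex - j + n) % n
--
--     steps = 0
--
--     while steps < n:
--         if words[next_index(steps)] == target or words[prev_index(steps)] == target:
--             return steps
--         steps += 1
--     return -1
-- ===== SOURCE B (Python) =====
-- def closetTarget(words, target, startIndex):
--     n = len(words)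
--     best = None
--     for i, w in enumerate(words):
--         if w == target:
--             d = min((i - startIndex) % n, (startIndex - i) % n)
--             if best is None or d < best:
--                 best = d
--     return -1 if best is None else best
-- ===== Notes on version B (the rewrite author's own statement) =====
-- stated objective: simpler
-- what changed: Replaced the radius-expanding two-direction probe loop (try distance 0,1,2,... in both directions until a match) by a single enumerate scan that computes each matching index's circular distance min((i-startIndex)%n,(startIndex-i)%n) and keeps the running minimum.
import Mathlib
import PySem

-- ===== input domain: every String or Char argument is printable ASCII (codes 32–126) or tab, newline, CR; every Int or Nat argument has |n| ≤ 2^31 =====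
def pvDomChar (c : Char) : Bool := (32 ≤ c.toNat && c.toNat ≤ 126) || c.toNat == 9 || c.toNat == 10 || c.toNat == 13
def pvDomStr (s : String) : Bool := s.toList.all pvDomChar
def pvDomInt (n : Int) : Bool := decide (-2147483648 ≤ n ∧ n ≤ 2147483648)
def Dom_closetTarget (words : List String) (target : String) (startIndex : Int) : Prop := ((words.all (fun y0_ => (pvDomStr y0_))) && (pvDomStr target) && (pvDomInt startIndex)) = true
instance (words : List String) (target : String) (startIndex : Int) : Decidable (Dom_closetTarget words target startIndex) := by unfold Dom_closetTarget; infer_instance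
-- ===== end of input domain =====

-- B replaces A's radius-expanding two-direction probe by a single minimum-of-circular-distances scan (objective: simpler).

-- ===== PORT A =====
-- the two lambdas next_index/prev_index combined into the loop's test; the index is always
-- in [0, n) when 0 < n, so the "" default of pyGetD is never used (Python never raises here)
def closetTargetHit (words : List String) (target : String) (startIndex n steps : Int) : Bool :=
  (PySem.List.pyGetD words (PySem.Int.mod (startIndex + steps) n) "" == target)
  || (PySem.List.pyGetD words (PySem.Int.mod (startIndex - steps + n) n) "" == target)

-- the 'while steps < n' loop: fuel counts the remaining iterations (n - steps)
def closetTargetLoop (words : List String) (target : String) (startIndex n steps : Int) (fuel : Nat) : Int :=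
  match fuel with
  | 0 => -1
  | Nat.succ f =>
    if closetTargetHit words target startIndex n steps then steps
    else closetTargetLoop words target startIndex n (steps + 1) f

def closetTarget (words : List String) (target : String) (startIndex : Int) : Int :=
  closetTargetLoop words target startIndex (words.length : Int) 0 words.length

-- ===== PORT B =====
-- the body of B's for-loop over enumerate(words): update the running best circular distance
def closetTargetStep (target : String) (startIndex n : Int) (best : Option Int) (p : Int × String) : Option Int :=
  if p.2 == target then
    let d := min (PySem.Int.mod (p.1 - startIndex) n) (PySem.Int.mod (startIndex - p.1) n)
    match best with
    | none => some d
    | some b => if d < b then some d else some b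
  else best

def closetTarget_alt (words : List String) (target : String) (startIndex : Int) : Int :=
  match (PySem.List.enumerate words 0).foldl (closetTargetStep target startIndex (words.length : Int)) none with
  | none => -1
  | some b => b

-- ===== PRECONDITION & SPEC =====
def Spec_closetTarget (words : List String) (target : String) (startIndex : Int) (out : Int) : Prop := out = closetTarget_alt words target startIndex
instance (words : List String) (target : String) (startIndex : Int) (out : Int) : Decidable (Spec_closetTarget words target startIndex out) := by unfold Spec_closetTarget; infer_instance

-- ===== CLAIM (what is proved, stated in full; the proofs are below) =====
def Claim_equal_closetTarget : Prop := ∀ (words : List String) (target : String) (startIndex : Int), Dom_closetTarget words target startIndex → Spec_closetTarget words target startIndex (closetTarget words target startIndex)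

-- ===== LEMMAS AND PROOFS =====

-- the circular distance B computes for index i
def pvDist (startIndex n i : Int) : Int :=
  min (PySem.Int.mod (i - startIndex) n) (PySem.Int.mod (startIndex - i) n)

-- modular cancellation facts --------------------------------------------------

theorem pv_emod_cancel_add (s b n : Int) : (s + (b - s) % n) % n = b % n := by
  rw [Int.add_emod, Int.emod_emod_of_dvd _ dvd_rfl, ← Int.add_emod]
  ring_nf

theorem pv_emod_cancel_sub (s b n : Int) : (s - (s - b) % n) % n = b % n := by
  rw [Int.sub_emod, Int.emod_emod_of_dvd _ dvd_rfl, ← Int.sub_emod]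
  ring_nf

theorem pv_emod_back_add (s k n : Int) (h0 : 0 ≤ k) (h1 : k < n) :
    ((s + k) % n - s) % n = k := by
  rw [Int.sub_emod, Int.emod_emod_of_dvd _ dvd_rfl, ← Int.sub_emod, add_sub_cancel_left,
    Int.emod_eq_of_lt h0 h1]

theorem pv_emod_back_sub (s k n : Int) (h0 : 0 ≤ k) (h1 : k < n) :
    (s - (s - k) % n) % n = k := by
  rw [pv_emod_cancel_sub, Int.emod_eq_of_lt h0 h1]

-- characterization of A's test ------------------------------------------------

-- if no word equals the target, the test is always false
theorem pv_hit_false (words : List String) (target : String) (s n k : Int)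
    (hn : n = (words.length : Int)) (hpos : 0 < n)
    (hnone : ∀ i : Nat, (hi : i < words.length) → words[i] ≠ target) :
    closetTargetHit words target s n k = false := by
  unfold closetTargetHit
  rw [PySem.Int.mod_eq_emod_of_pos hpos, PySem.Int.mod_eq_emod_of_pos hpos]
  have hne : n ≠ 0 := ne_of_gt hpos
  have h1 : PySem.List.pyGetD words ((s + k) % n) "" ≠ target := by
    rw [PySem.List.pyGetD_eq_getElem words "" (Int.emod_nonneg _ hne) (hn ▸ Int.emod_lt_of_pos _ hpos)]
    exact hnone _ _
  have heq : (s - k + n) % n = (s - k) % n := by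
    have := Int.add_mul_emod_self_left (a := s - k) (b := n) (c := 1)
    simp only [mul_one] at this
    exact this
  rw [heq]
  have h2 : PySem.List.pyGetD words ((s - k) % n) "" ≠ target := by
    rw [PySem.List.pyGetD_eq_getElem words "" (Int.emod_nonneg _ hne) (hn ▸ Int.emod_lt_of_pos _ hpos)]
    exact hnone _ _
  simp [h1, h2]

-- if the test fires at step k (0 ≤ k < n), some matching index has distance ≤ k
theorem pv_hit_true_exists (words : List String) (target : String) (s n k : Int)
    (hn : n = (words.length : Int)) (hpos : 0 < n) (hk0 : 0 ≤ k) (hk1 : k < n)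
    (h : closetTargetHit words target s n k = true) :
    ∃ i : Nat, ∃ hi : i < words.length, words[i] = target ∧ pvDist s n (i : Int) ≤ k := by
  unfold closetTargetHit at h
  rw [PySem.Int.mod_eq_emod_of_pos hpos, PySem.Int.mod_eq_emod_of_pos hpos] at h
  have hne : n ≠ 0 := ne_of_gt hpos
  rcases Bool.or_eq_true_iff.mp h with h1 | h1
  · -- words[(s+k) % n] = target
    have hlt : (s + k) % n < (words.length : Int) := hn ▸ Int.emod_lt_of_pos _ hpos
    have h0 : (0:Int) ≤ (s + k) % n := Int.emod_nonneg _ hne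
    rw [PySem.List.pyGetD_eq_getElem words "" h0 hlt] at h1
    refine ⟨((s + k) % n).toNat, by omega, by simpa using h1, ?_⟩
    have hcast : ((((s + k) % n).toNat : Nat) : Int) = (s + k) % n := Int.toNat_of_nonneg h0
    unfold pvDist
    rw [PySem.Int.mod_eq_emod_of_pos hpos, PySem.Int.mod_eq_emod_of_pos hpos, hcast]
    calc min (((s + k) % n - s) % n) ((s - (s + k) % n) % n)
        ≤ ((s + k) % n - s) % n := min_le_left _ _
      _ = k := pv_emod_back_add s k n hk0 hk1
  · -- words[(s-k+n) % n] = target;  (s-k+n) % n = (s-k) % n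
    have heq : (s - k + n) % n = (s - k) % n := by
      have := Int.add_mul_emod_self_left (a := s - k) (b := n) (c := 1)
      simp only [mul_one] at this
      exact this
    rw [heq] at h1
    have hlt : (s - k) % n < (words.length : Int) := hn ▸ Int.emod_lt_of_pos _ hpos
    have h0 : (0:Int) ≤ (s - k) % n := Int.emod_nonneg _ hne
    rw [PySem.List.pyGetD_eq_getElem words "" h0 hlt] at h1
    refine ⟨((s - k) % n).toNat, by omega, by simpa using h1, ?_⟩
    have hcast : ((((s - k) % n).toNat : Nat) : Int) = (s - k) % n := Int.toNat_of_nonneg h0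
    unfold pvDist
    rw [PySem.Int.mod_eq_emod_of_pos hpos, PySem.Int.mod_eq_emod_of_pos hpos, hcast]
    calc min (((s - k) % n - s) % n) ((s - (s - k) % n) % n)
        ≤ (s - (s - k) % n) % n := min_le_right _ _
      _ = k := pv_emod_back_sub s k n hk0 hk1

-- if index i matches, the test fires at step (pvDist s n i)
theorem pv_hit_at_dist (words : List String) (target : String) (s n : Int) (i : Nat)
    (hn : n = (words.length : Int)) (hpos : 0 < n) (hi : i < words.length)
    (ht : words[i] = target) :
    closetTargetHit words target s n (pvDist s n (i : Int)) = true := by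
  have hne : n ≠ 0 := ne_of_gt hpos
  have hi' : ((i : Int)) < n := by omega
  have hi0 : (0:Int) ≤ (i : Int) := Int.natCast_nonneg i
  unfold closetTargetHit pvDist
  rw [PySem.Int.mod_eq_emod_of_pos hpos, PySem.Int.mod_eq_emod_of_pos hpos,
    PySem.Int.mod_eq_emod_of_pos hpos, PySem.Int.mod_eq_emod_of_pos hpos]
  rcases le_total (((i : Int) - s) % n) ((s - (i : Int)) % n) with hle | hle
  · rw [min_eq_left hle]
    have : (s + ((i : Int) - s) % n) % n = (i : Int) := by
      rw [pv_emod_cancel_add, Int.emod_eq_of_lt hi0 hi']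
    apply Bool.or_eq_true_iff.mpr; left
    rw [this, PySem.List.pyGetD_eq_getElem words "" hi0 (by omega)]
    simp [ht]
  · rw [min_eq_right hle]
    have heq : (s - (s - (i : Int)) % n + n) % n = (i : Int) := by
      have h1 : (s - (s - (i : Int)) % n + n) % n = (s - (s - (i : Int)) % n) % n := by
        have := Int.add_mul_emod_self_left (a := s - (s - (i : Int)) % n) (b := n) (c := 1)
        simp only [mul_one] at this
        exact this
      rw [h1, pv_emod_cancel_sub, Int.emod_eq_of_lt hi0 hi']
    apply Bool.or_eq_true_iff.mpr; right
    rw [heq, PySem.List.pyGetD_eq_getElem words "" hi0 (by omega)]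
    simp [ht]

-- the loop ---------------------------------------------------------------------

theorem pv_loop_none (words : List String) (target : String) (s n : Int)
    (hfalse : ∀ k : Int, closetTargetHit words target s n k = false) :
    ∀ (fuel : Nat) (steps : Int), closetTargetLoop words target s n steps fuel = -1 := by
  intro fuel
  induction fuel with
  | zero => intro steps; rfl
  | succ f ih => intro steps; simp [closetTargetLoop, hfalse, ih]

theorem pv_loop_finds (words : List String) (target : String) (s n m : Int)
    (hm : closetTargetHit words target s n m = true) :
    ∀ (fuel : Nat) (steps : Int), steps ≤ m → m < steps + fuel →
      (∀ j : Int, steps ≤ j → j < m → closetTargetHit words target s n j = false) →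
      closetTargetLoop words target s n steps fuel = m := by
  intro fuel
  induction fuel with
  | zero => intro steps h1 h2 _; omega
  | succ f ih =>
    intro steps h1 h2 hbelow
    by_cases hs : closetTargetHit words target s n steps = true
    · have heq : steps = m := by
        by_contra hne
        have : steps < m := lt_of_le_of_ne h1 hne
        exact absurd hs (by simp [hbelow steps le_rfl this])
      subst heq
      simp [closetTargetLoop, hs]
    · have hsm : steps ≠ m := fun h => hs (h ▸ hm)
      have : closetTargetLoop words target s n steps (f + 1) =
          closetTargetLoop words target s n (steps + 1) f := by
        simp [closetTargetLoop, hs]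
      rw [this]
      exact ih (steps + 1) (by omega) (by omega) (fun j hj1 hj2 => hbelow j (by omega) hj2)

-- B's fold --------------------------------------------------------------------

theorem pv_fold_spec (target : String) (s n : Int) :
    ∀ (l : List (Int × String)) (acc : Option Int),
      match l.foldl (closetTargetStep target s n) acc with
      | none => acc = none ∧ ∀ p ∈ l, p.2 ≠ target
      | some m =>
          (acc = some m ∨ ∃ p ∈ l, p.2 = target ∧ pvDist s n p.1 = m) ∧
          (∀ b, acc = some b → m ≤ b) ∧
          (∀ p ∈ l, p.2 = target → m ≤ pvDist s n p.1) := by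
  intro l
  induction l with
  | nil =>
    intro acc
    cases acc with
    | none => simp
    | some b => simp
  | cons p l ih =>
    intro acc
    rw [List.foldl_cons]
    by_cases hp : p.2 = target
    · cases acc with
      | none =>
        have hstep : closetTargetStep target s n none p = some (pvDist s n p.1) := by
          unfold closetTargetStep pvDist
          rw [if_pos (by simp [hp] : (p.2 == target) = true)]
        rw [hstep]
        have h := ih (some (pvDist s n p.1))
        cases hfold : l.foldl (closetTargetStep target s n) (some (pvDist s n p.1)) with
        | none => rw [hfold] at h; exact absurd h.1 (by simp)
        | some m =>
          rw [hfold] at h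
          obtain ⟨hsrc, hleacc, hlel⟩ := h
          refine ⟨?_, fun b hb => absurd hb (by simp), ?_⟩
          · rcases hsrc with hsrc | ⟨q, hq, hqt, hqd⟩
            · right; exact ⟨p, List.mem_cons_self, hp, by simpa using hsrc⟩
            · right; exact ⟨q, List.mem_cons_of_mem _ hq, hqt, hqd⟩
          · intro q hq hqt
            rcases List.mem_cons.mp hq with rfl | hq
            · exact hleacc _ rfl
            · exact hlel q hq hqt
      | some b0 =>
        have hstep : closetTargetStep target s n (some b0) p =
            some (if pvDist s n p.1 < b0 then pvDist s n p.1 else b0) := by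
          unfold closetTargetStep pvDist
          rw [if_pos (by simp [hp] : (p.2 == target) = true)]
          exact (apply_ite some _ _ _).symm
        rw [hstep]
        have h := ih (some (if pvDist s n p.1 < b0 then pvDist s n p.1 else b0))
        cases hfold : l.foldl (closetTargetStep target s n)
            (some (if pvDist s n p.1 < b0 then pvDist s n p.1 else b0)) with
        | none => rw [hfold] at h; exact absurd h.1 (by simp)
        | some m =>
          rw [hfold] at h
          obtain ⟨hsrc, hleacc, hlel⟩ := h
          have hmd : m ≤ if pvDist s n p.1 < b0 then pvDist s n p.1 else b0 := hleacc _ rfl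
          refine ⟨?_, ?_, ?_⟩
          · rcases hsrc with hsrc | ⟨q, hq, hqt, hqd⟩
            · have hdm : (if pvDist s n p.1 < b0 then pvDist s n p.1 else b0) = m := by
                simpa using hsrc
              by_cases hlt : pvDist s n p.1 < b0
              · right
                rw [if_pos hlt] at hdm
                exact ⟨p, List.mem_cons_self, hp, hdm⟩
              · left
                rw [if_neg hlt] at hdm
                exact congrArg some hdm
            · right; exact ⟨q, List.mem_cons_of_mem _ hq, hqt, hqd⟩
          · intro b hb
            injection hb with hb
            by_cases hlt : pvDist s n p.1 < b0
            · rw [if_pos hlt] at hmd; omega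
            · rw [if_neg hlt] at hmd; omega
          · intro q hq hqt
            rcases List.mem_cons.mp hq with rfl | hq
            · by_cases hlt : pvDist s n q.1 < b0
              · rw [if_pos hlt] at hmd; exact hmd
              · rw [if_neg hlt] at hmd; omega
            · exact hlel q hq hqt
    · have hstep : closetTargetStep target s n acc p = acc := by
        unfold closetTargetStep
        rw [if_neg (by simp [hp] : ¬ (p.2 == target) = true)]
      rw [hstep]
      have h := ih acc
      cases hfold : l.foldl (closetTargetStep target s n) acc with
      | none =>
        rw [hfold] at h
        refine ⟨h.1, ?_⟩
        intro q hq
        rcases List.mem_cons.mp hq with rfl | hq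
        · exact hp
        · exact h.2 q hq
      | some m =>
        rw [hfold] at h
        obtain ⟨hsrc, hleacc, hlel⟩ := h
        refine ⟨?_, hleacc, ?_⟩
        · rcases hsrc with hsrc | ⟨q, hq, hqt, hqd⟩
          · left; exact hsrc
          · right; exact ⟨q, List.mem_cons_of_mem _ hq, hqt, hqd⟩
        · intro q hq hqt
          rcases List.mem_cons.mp hq with rfl | hq
          · exact absurd hqt hp
          · exact hlel q hq hqt

-- membership in enumerate -----------------------------------------------------

theorem pv_mem_enumerate {α : Type} (xs : List α) :
    ∀ (s : Int) (p : Int × α), p ∈ PySem.List.enumerate xs s ↔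
      ∃ i : Nat, ∃ hi : i < xs.length, p.1 = s + (i : Int) ∧ p.2 = xs[i] := by
  induction xs with
  | nil => intro s p; simp [PySem.List.enumerate]
  | cons x xs ih =>
    intro s p
    rw [PySem.List.enumerate_cons, List.mem_cons]
    constructor
    · rintro (rfl | hp)
      · exact ⟨0, by simp, by simp, by simp⟩
      · obtain ⟨i, hi, h1, h2⟩ := (ih (s + 1) p).mp hp
        refine ⟨i + 1, by simp [Nat.succ_lt_succ hi], ?_, by simpa using h2⟩
        rw [h1]; push_cast; ring
    · rintro ⟨i, hi, h1, h2⟩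
      cases i with
      | zero =>
        left
        simp only [Nat.cast_zero, add_zero] at h1
        simp only [List.getElem_cons_zero] at h2
        exact Prod.ext_iff.mpr ⟨h1, h2⟩
      | succ i =>
        right
        apply (ih (s + 1) p).mpr
        refine ⟨i, by simp only [List.length_cons] at hi; omega, ?_, by simpa using h2⟩
        rw [h1]; push_cast; ring

-- distances are in [0, n) -----------------------------------------------------

theorem pv_dist_bounds (s n i : Int) (hpos : 0 < n) :
    0 ≤ pvDist s n i ∧ pvDist s n i < n := by
  unfold pvDist
  rw [PySem.Int.mod_eq_emod_of_pos hpos, PySem.Int.mod_eq_emod_of_pos hpos]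
  have hne : n ≠ 0 := ne_of_gt hpos
  have h1 := Int.emod_nonneg (i - s) hne
  have h2 := Int.emod_nonneg (s - i) hne
  have h3 := Int.emod_lt_of_pos (i - s) hpos
  have h4 := Int.emod_lt_of_pos (s - i) hpos
  constructor
  · exact le_min h1 h2
  · exact lt_of_le_of_lt (min_le_left _ _) h3

-- ===== VERDICT (by name: the statement is the Claim_ definition above) =====
theorem closetTarget_spec : Claim_equal_closetTarget := by
  intro words target s _
  unfold Spec_closetTarget closetTarget closetTarget_alt
  rcases Nat.eq_zero_or_pos words.length with h0 | hlen
  · -- empty list: both sides are -1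
    obtain rfl : words = [] := List.length_eq_zero_iff.mp h0
    rfl
  · set n : Int := (words.length : Int) with hn
    have hpos : 0 < n := by omega
    have hfold := pv_fold_spec target s n (PySem.List.enumerate words 0) none
    cases hres : (PySem.List.enumerate words 0).foldl (closetTargetStep target s n) none with
    | none =>
      rw [hres] at hfold
      have hnone : ∀ i : Nat, (hi : i < words.length) → words[i] ≠ target := by
        intro i hi
        have : ((i : Int), words[i]) ∈ PySem.List.enumerate words 0 :=
          (pv_mem_enumerate words 0 _).mpr ⟨i, hi, by simp, rfl⟩
        exact hfold.2 _ this
      exact pv_loop_none words target s n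
        (fun k => pv_hit_false words target s n k hn hpos hnone) words.length 0
    | some m =>
      rw [hres] at hfold
      obtain ⟨hsrc, _, hlel⟩ := hfold
      rcases hsrc with hsrc | ⟨p, hp, hpt, hpd⟩
      · exact absurd hsrc (by simp)
      · obtain ⟨i, hi, hp1, hp2⟩ := (pv_mem_enumerate words 0 p).mp hp
        have hpi : p.1 = (i : Int) := by omega
        have hdist := pv_dist_bounds s n (i : Int) hpos
        have hd' : pvDist s n (i : Int) = m := by rw [← hpd, hpi]
        have hm0 : 0 ≤ m := hd' ▸ hdist.1
        have hmn : m < n := hd' ▸ hdist.2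
        have hhit : closetTargetHit words target s n m = true := by
          rw [← hd']
          exact pv_hit_at_dist words target s n i hn hpos hi (hp2 ▸ hpt)
        have hbelow : ∀ j : Int, 0 ≤ j → j < m → closetTargetHit words target s n j = false := by
          intro j hj0 hj1
          by_contra hj
          have hj' : closetTargetHit words target s n j = true := by
            cases hcase : closetTargetHit words target s n j
            · exact absurd hcase hj
            · rfl
          obtain ⟨i', hi', ht', hd'⟩ :=
            pv_hit_true_exists words target s n j hn hpos hj0 (by omega) hj'
          have : ((i' : Int), words[i']) ∈ PySem.List.enumerate words 0 :=
            (pv_mem_enumerate words 0 _).mpr ⟨i', hi', by simp, rfl⟩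
          have := hlel _ this ht'
          simp only [] at this
          omega
        exact pv_loop_finds words target s n m hhit words.length 0 hm0 (by omega) hbelow
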